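-- pv_equiv track=rewrite | github.com/johnoliverdriscoll/project-euler | py/euler-0092.py | square_digit_chain_terminator
-- ===== SOURCE A (Python) =====
-- def square_digit_chain_terminator(n, memo=dict()):
--   if n == 1 or n == 89:
--     return n
--   r = memo.get(n, None)
--   if r == None:
--     r = square_digit_chain_terminator(sum([int(d) ** 2 for d in str(n)]))
--     memo[n] = r
--   return r
-- ===== SOURCE B (Python) =====
-- def square_digit_chain_terminator(n, memo=dict()):
--   # Iterative: follow the chain with a while loop, extracting digits
--   # arithmetically (% / //) instead of via str(); memo is kept for signature
--   # compatibility but unused (the terminator depends only on n).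
--   current = n
--   while current != 1 and current != 89:
--     s = 0
--     m = current
--     while m > 0:
--       s += (m % 10) ** 2
--       m //= 10
--     current = s
--   return current
-- ===== Notes on version B (the rewrite author's own statement) =====
-- stated objective: alternative
-- what changed: Replaces the memoized recursion over str(n)'s characters by an iterative while-loop that extracts digits arithmetically with modulus and floor division (no string conversion, no memo).
-- outside the precondition, e.g. on square_digit_chain_terminator(0): A raises RecursionError, B does not finish within the time limit; on square_digit_chain_terminator(-5): A raises ValueError, B does not finish within the time limit
import Mathlib
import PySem

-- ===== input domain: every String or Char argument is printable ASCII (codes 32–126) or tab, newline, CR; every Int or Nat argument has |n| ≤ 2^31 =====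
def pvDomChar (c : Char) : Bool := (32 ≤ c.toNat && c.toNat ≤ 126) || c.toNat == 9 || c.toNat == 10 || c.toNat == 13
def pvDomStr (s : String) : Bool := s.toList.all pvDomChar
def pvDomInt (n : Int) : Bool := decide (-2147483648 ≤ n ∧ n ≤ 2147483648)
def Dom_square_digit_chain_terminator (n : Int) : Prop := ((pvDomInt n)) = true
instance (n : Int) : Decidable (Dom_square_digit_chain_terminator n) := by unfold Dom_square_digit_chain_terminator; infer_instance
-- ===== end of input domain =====

-- B replaces A's memoized recursion over str(n) by an iterative loop extracting
-- digits arithmetically (% / //); return values agree for every n ≥ 1.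

-- ===== PORT A =====
-- A's recursion, memo ported as always-missing (a fresh call's dict lookup misses;
-- memo entries never change the return value). Fuel 1000 bounds the recursion
-- depth; any chain from 1 ≤ n ≤ 2^31 reaches 1 or 89 in far fewer steps.
-- sum([int(d) ** 2 for d in str(n)]) : int(d) raises on '-', unreachable for n ≥ 1 (Pre_).
def pyStepA (n : Int) : Int :=
  (((PySem.Int.toStr n).toList).map (fun d => ((PySem.Int.ofChars? [d]).getD 0) ^ 2)).sum

def chainA : Nat → Int → Int
  | 0, n => n
  | fuel+1, n => if n = 1 ∨ n = 89 then n else chainA fuel (pyStepA n)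

def square_digit_chain_terminator (n : Int) : Int := chainA 1000 n

-- ===== PORT B =====
-- inner `while m > 0: s += (m % 10) ** 2; m //= 10`
def bInner (m s : Int) : Int :=
  if h : 0 < m then bInner (PySem.Int.floordiv m 10) (s + (PySem.Int.mod m 10) ^ 2) else s
  termination_by m.toNat
  decreasing_by
    rw [PySem.Int.floordiv_eq_ediv_of_pos (by norm_num)]
    omega

-- outer `while current != 1 and current != 89` (fuel 1000 as for A's recursion)
def chainB : Nat → Int → Int
  | 0, c => c
  | fuel+1, c => if c ≠ 1 ∧ c ≠ 89 then chainB fuel (bInner c 0) else c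

def square_digit_chain_terminator_alt (n : Int) : Int := chainB 1000 n

-- ===== PRECONDITION & SPEC =====
-- Pre_ excludes n ≤ 0, where A never returns: negative n raises ValueError
-- (int('-')) and n = 0 recurses forever (RecursionError).
def Pre_square_digit_chain_terminator (n : Int) : Prop := 1 ≤ n
instance (n : Int) : Decidable (Pre_square_digit_chain_terminator n) := by
  unfold Pre_square_digit_chain_terminator; infer_instance

def pvWitness_square_digit_chain_terminator : Int := 44

def Spec_square_digit_chain_terminator (n : Int) (out : Int) : Prop := out = square_digit_chain_terminator_alt n
instance (n : Int) (out : Int) : Decidable (Spec_square_digit_chain_terminator n out) := by unfold Spec_square_digit_chain_terminator; infer_instance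

-- ===== CLAIM (what is proved, stated in full; the proofs are below) =====
def Claim_equal_square_digit_chain_terminator : Prop := ∀ (n : Int), Dom_square_digit_chain_terminator n → Pre_square_digit_chain_terminator n → Spec_square_digit_chain_terminator n (square_digit_chain_terminator n)

-- ===== LEMMAS AND PROOFS =====

-- digit-square-sum at the Nat level, via Mathlib's Nat.digits
def natSqSum (m : Nat) : Nat := ((Nat.digits 10 m).map (fun d => d ^ 2)).sum

lemma ofChars?_digitChar {d : Nat} (hd : d < 10) :
    PySem.Int.ofChars? [Nat.digitChar d] = some (d : Int) := by
  interval_cases d <;> decide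

lemma toDigitsCore_eq (fuel : Nat) : ∀ (n : Nat) (acc : List Char), 0 < n → n < fuel →
    Nat.toDigitsCore 10 fuel n acc = ((Nat.digits 10 n).map Nat.digitChar).reverse ++ acc := by
  induction fuel with
  | zero => intro n acc h1 h2; omega
  | succ f ih =>
    intro n acc h1 h2
    rw [Nat.toDigitsCore]
    rw [Nat.digits_def' (by norm_num : (1:Nat) < 10) h1]
    by_cases hdiv : n / 10 = 0
    · have hn : n < 10 := by omega
      simp [hdiv, Nat.mod_eq_of_lt hn]
    · simp only [hdiv, if_false]
      rw [ih (n / 10) _ (by omega) (by omega)]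
      simp

lemma pyStepA_natCast (m : Nat) (hm : 0 < m) :
    pyStepA (m : Int) = (natSqSum m : Int) := by
  unfold pyStepA natSqSum
  rw [PySem.Int.toList_toStr]
  have hneg : ¬ ((m : Int) < 0) := by omega
  simp only [PySem.Int.toChars, hneg, if_false, Int.toNat_natCast]
  rw [Nat.toDigits, toDigitsCore_eq (m + 1) m [] hm (by omega)]
  rw [List.append_nil, List.map_reverse, List.map_map, List.sum_reverse]
  rw [List.map_congr_left (fun d hdm => by
    show ((PySem.Int.ofChars? [Nat.digitChar d]).getD 0) ^ 2 = ((d : Int)) ^ 2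
    rw [ofChars?_digitChar (Nat.digits_lt_base (by norm_num) hdm)]
    rfl)]
  push_cast
  rw [List.map_map]
  rfl

lemma bInner_natCast (m : Nat) : ∀ s : Int, bInner (m : Int) s = s + (natSqSum m : Int) := by
  induction m using Nat.strong_induction_on with
  | _ m ih =>
    intro s
    rw [bInner]
    by_cases hm : 0 < (m : Int)
    · have hm' : 0 < m := by omega
      simp only [hm, dif_pos]
      rw [PySem.Int.floordiv_eq_ediv_of_pos (by norm_num),
          PySem.Int.mod_eq_emod_of_pos (by norm_num)]
      have h1 : (m : Int) / 10 = ((m / 10 : Nat) : Int) := by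
        omega
      have h2 : (m : Int) % 10 = ((m % 10 : Nat) : Int) := by
        omega
      rw [h1, h2, ih (m / 10) (Nat.div_lt_self hm' (by norm_num))]
      unfold natSqSum
      rw [Nat.digits_def' (by norm_num : (1:Nat) < 10) hm']
      simp only [List.map_cons, List.sum_cons]
      push_cast
      ring
    · have hm' : m = 0 := by omega
      simp [hm', natSqSum]

lemma natSqSum_pos (m : Nat) (hm : 0 < m) : 0 < natSqSum m := by
  induction m using Nat.strong_induction_on with
  | _ m ih =>
    unfold natSqSum
    rw [Nat.digits_def' (by norm_num : (1:Nat) < 10) hm]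
    simp only [List.map_cons, List.sum_cons]
    by_cases hdiv : m / 10 = 0
    · have hmod : m % 10 = m := by omega
      simp [hdiv, hmod]
      exact pow_pos hm 2
    · have := ih (m / 10) (Nat.div_lt_self hm (by norm_num)) (by omega)
      unfold natSqSum at this
      omega

lemma step_eq (n : Int) (hn : 1 ≤ n) : pyStepA n = bInner n 0 := by
  obtain ⟨m, rfl⟩ : ∃ m : Nat, n = (m : Int) := ⟨n.toNat, by omega⟩
  rw [pyStepA_natCast m (by omega), bInner_natCast m 0, zero_add]

lemma step_pos (n : Int) (hn : 1 ≤ n) : 1 ≤ pyStepA n := by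
  obtain ⟨m, rfl⟩ : ∃ m : Nat, n = (m : Int) := ⟨n.toNat, by omega⟩
  rw [pyStepA_natCast m (by omega)]
  have := natSqSum_pos m (by omega)
  omega

lemma chain_eq (fuel : Nat) : ∀ n : Int, 1 ≤ n → chainA fuel n = chainB fuel n := by
  induction fuel with
  | zero => intro n _; rfl
  | succ f ih =>
    intro n hn
    rw [chainA, chainB]
    by_cases hterm : n = 1 ∨ n = 89
    · have hneg : ¬ (n ≠ 1 ∧ n ≠ 89) := by tauto
      rw [if_pos hterm, if_neg hneg]
    · have h2 : n ≠ 1 ∧ n ≠ 89 := by tauto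
      rw [if_neg hterm, if_pos h2, ← step_eq n hn]
      exact ih (pyStepA n) (step_pos n hn)

-- ===== VERDICT (by name: the statement is the Claim_ definition above) =====
theorem square_digit_chain_terminator_spec : Claim_equal_square_digit_chain_terminator := by
  intro n _ hpre
  unfold Spec_square_digit_chain_terminator square_digit_chain_terminator square_digit_chain_terminator_alt
  exact chain_eq 1000 n hpre
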